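-- pv_equiv track=rewrite | github.com/pypi-data/pypi-mirror-237 | packages/gradienter/gradienter-0.16.tar.gz/gradienter-0.16/gradienter/__init__.py | colorize_text
-- ===== SOURCE A (Python) =====
-- def colorize_text(text, start_color, end_color, steps):
--     # calculate the color step for each component (rgb)
--     r_step, g_step, b_step = [(end - start) // steps for start, end in zip(start_color, end_color)]
--
--     colored_text = ""
--
--     red, green, blue = start_color
--
--     lines = text.splitlines()
--
--     for line in lines:
--         # construct the ANSI escape code for the current color
--         color_code = f"\033[38;2;{red};{green};{blue}m"
--
--         # append the current line with the color code and reset (0m) to the colored_text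
--         colored_text += f"{color_code}{line}\033[0m\n"
--
--         # update the color components for the next line
--         red += r_step
--         green += g_step
--         blue += b_step
--
--     return colored_text
-- ===== SOURCE B (Python) =====
-- def colorize_text(text, start_color, end_color, steps):
--     r_step, g_step, b_step = [(e - s) // steps for s, e in zip(start_color, end_color)]
--
--     def go(lines, r, g, b):
--         if not lines:
--             return ""
--         head = f"\033[38;2;{r};{g};{b}m{lines[0]}\033[0m\n"
--         return head + go(lines[1:], r + r_step, g + g_step, b + b_step)
--
--     return go(text.splitlines(), *start_color)
-- ===== Notes on version B (the rewrite author's own statement) =====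
-- stated objective: alternative
-- what changed: Replaces A's iterative loop with mutable red/green/blue accumulators and += string concatenation onto a growing result by a recursive decomposition: a helper recurses on the tail of the line list, threading the current color, and builds the output back-to-front as head + recursive rest.
import Mathlib
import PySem

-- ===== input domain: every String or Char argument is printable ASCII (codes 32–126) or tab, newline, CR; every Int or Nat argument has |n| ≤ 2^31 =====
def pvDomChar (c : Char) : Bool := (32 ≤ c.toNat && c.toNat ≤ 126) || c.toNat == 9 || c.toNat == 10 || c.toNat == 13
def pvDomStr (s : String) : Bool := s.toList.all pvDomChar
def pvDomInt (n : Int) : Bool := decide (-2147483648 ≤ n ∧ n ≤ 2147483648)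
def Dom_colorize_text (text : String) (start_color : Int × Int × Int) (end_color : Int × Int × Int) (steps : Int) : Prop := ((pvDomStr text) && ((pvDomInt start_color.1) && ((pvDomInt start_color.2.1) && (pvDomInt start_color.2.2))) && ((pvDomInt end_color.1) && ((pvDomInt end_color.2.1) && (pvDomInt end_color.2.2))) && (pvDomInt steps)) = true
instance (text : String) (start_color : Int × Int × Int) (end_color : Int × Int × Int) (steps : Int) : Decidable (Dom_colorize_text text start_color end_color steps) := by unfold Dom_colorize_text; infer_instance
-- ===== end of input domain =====

-- B replaces A's iterative accumulator loop (mutable red/green/blue, += string building) with a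
-- recursive helper on the line list that threads the current color and builds head + rest; same cost.


-- ===== PORT A =====
-- f"\033[38;2;{r};{g};{b}m{line}\033[0m\n" as a List Char (exact: PySem.Int.toChars = str(n))
def pvLineA (r g b : Int) (line : List Char) : List Char :=
  "\x1b[38;2;".toList ++ PySem.Int.toChars r ++ [';'] ++ PySem.Int.toChars g ++ [';'] ++
    PySem.Int.toChars b ++ ['m'] ++ line ++ "\x1b[0m\n".toList

def colorize_text (text : String) (start_color : Int × Int × Int) (end_color : Int × Int × Int) (steps : Int) : String :=
  let r_step := PySem.Int.floordiv (end_color.1 - start_color.1) steps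
  let g_step := PySem.Int.floordiv (end_color.2.1 - start_color.2.1) steps
  let b_step := PySem.Int.floordiv (end_color.2.2 - start_color.2.2) steps
  let lines := PySem.Chars.splitlines text.toList
  let st := lines.foldl
    (fun (st : List Char × Int × Int × Int) line =>
      (st.1 ++ pvLineA st.2.1 st.2.2.1 st.2.2.2 line,
       st.2.1 + r_step, st.2.2.1 + g_step, st.2.2.2 + b_step))
    (([] : List Char), start_color.1, start_color.2.1, start_color.2.2)
  String.ofList st.1

-- ===== PORT B =====
-- same ANSI line format, on B's side
def pvLineB (r g b : Int) (line : List Char) : List Char :=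
  "\x1b[38;2;".toList ++ PySem.Int.toChars r ++ [';'] ++ PySem.Int.toChars g ++ [';'] ++
    PySem.Int.toChars b ++ ['m'] ++ line ++ "\x1b[0m\n".toList

-- Source B's recursive helper `go`: recursion on the line list, threading the color
def pvGoB (rs gs bs : Int) : List (List Char) → Int → Int → Int → List Char
  | [], _, _, _ => []
  | l :: ls, r, g, b => pvLineB r g b l ++ pvGoB rs gs bs ls (r + rs) (g + gs) (b + bs)

def colorize_text_alt (text : String) (start_color : Int × Int × Int) (end_color : Int × Int × Int) (steps : Int) : String :=
  let r_step := PySem.Int.floordiv (end_color.1 - start_color.1) steps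
  let g_step := PySem.Int.floordiv (end_color.2.1 - start_color.2.1) steps
  let b_step := PySem.Int.floordiv (end_color.2.2 - start_color.2.2) steps
  String.ofList (pvGoB r_step g_step b_step (PySem.Chars.splitlines text.toList)
    start_color.1 start_color.2.1 start_color.2.2)

-- ===== PRECONDITION & SPEC =====
-- Pre_ excludes steps = 0, on which Python A raises ZeroDivisionError (B raises there too).
def Pre_colorize_text (text : String) (start_color : Int × Int × Int) (end_color : Int × Int × Int) (steps : Int) : Prop := steps ≠ 0
instance (text : String) (start_color : Int × Int × Int) (end_color : Int × Int × Int) (steps : Int) : Decidable (Pre_colorize_text text start_color end_color steps) := by unfold Pre_colorize_text; infer_instance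

def pvWitness_colorize_text : String × (Int × Int × Int) × (Int × Int × Int) × Int :=
  ("hello\nworld", (255, 0, 0), (0, 0, 255), 2)

def Spec_colorize_text (text : String) (start_color : Int × Int × Int) (end_color : Int × Int × Int) (steps : Int) (out : String) : Prop := out = colorize_text_alt text start_color end_color steps
instance (text : String) (start_color : Int × Int × Int) (end_color : Int × Int × Int) (steps : Int) (out : String) : Decidable (Spec_colorize_text text start_color end_color steps out) := by unfold Spec_colorize_text; infer_instance

-- ===== CLAIM (what is proved, stated in full; the proofs are below) =====
def Claim_equal_colorize_text : Prop := ∀ (text : String) (start_color : Int × Int × Int) (end_color : Int × Int × Int) (steps : Int), Dom_colorize_text text start_color end_color steps → Pre_colorize_text text start_color end_color steps → Spec_colorize_text text start_color end_color steps (colorize_text text start_color end_color steps)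

-- ===== LEMMAS AND PROOFS =====

lemma pv_loop_eq (rs gs bs : Int) (lines : List (List Char)) :
    ∀ (acc : List Char) (r g b : Int),
    (lines.foldl
      (fun (st : List Char × Int × Int × Int) line =>
        (st.1 ++ pvLineA st.2.1 st.2.2.1 st.2.2.2 line,
         st.2.1 + rs, st.2.2.1 + gs, st.2.2.2 + bs))
      (acc, r, g, b)).1
    = acc ++ pvGoB rs gs bs lines r g b := by
  induction lines with
  | nil => intro acc r g b; simp [pvGoB]
  | cons l ls ih =>
    intro acc r g b
    simp only [List.foldl_cons, pvGoB]
    rw [ih (acc ++ pvLineA r g b l) (r + rs) (g + gs) (b + bs), List.append_assoc]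
    rfl

-- ===== VERDICT (by name: the statement is the Claim_ definition above) =====
theorem colorize_text_spec : Claim_equal_colorize_text := by
  intro text sc ec steps _ _
  unfold Spec_colorize_text colorize_text colorize_text_alt
  simp only []
  rw [pv_loop_eq]
  rfl
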